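-- pv_equiv track=rewrite | github.com/DeSerg/regional | scripts/regional_classifier/regional_classifier_classify.py | _calculate_first_positions
-- ===== SOURCE A (Python) =====
-- def _calculate_first_positions(a, labels):
--     if len(labels) == 0:
--         return []
--     positions, count, total_number = dict(), 0, len(labels)
--     for i, x in enumerate(a):
--         if x in labels and x not in positions:
--             positions[x] = i
--             count += 1
--             if count == len(labels):
--                 break
--     return [positions.get(x, None) for x in labels]
-- ===== SOURCE B (Python) =====
-- def _calculate_first_positions(a, labels):
--     result = []
--     for label in labels:
--         try:
--             result.append(a.index(label))
--         except ValueError: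
--             result.append(None)
--     return result
-- ===== Notes on version B (the rewrite author's own statement) =====
-- stated objective: simpler
-- what changed: Replaces the single-pass dict-index-building loop with early break and a final dict lookup per label by a direct per-label scan: for each label, a.index(label) inside try/except, appending the index or None.
import Mathlib
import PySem

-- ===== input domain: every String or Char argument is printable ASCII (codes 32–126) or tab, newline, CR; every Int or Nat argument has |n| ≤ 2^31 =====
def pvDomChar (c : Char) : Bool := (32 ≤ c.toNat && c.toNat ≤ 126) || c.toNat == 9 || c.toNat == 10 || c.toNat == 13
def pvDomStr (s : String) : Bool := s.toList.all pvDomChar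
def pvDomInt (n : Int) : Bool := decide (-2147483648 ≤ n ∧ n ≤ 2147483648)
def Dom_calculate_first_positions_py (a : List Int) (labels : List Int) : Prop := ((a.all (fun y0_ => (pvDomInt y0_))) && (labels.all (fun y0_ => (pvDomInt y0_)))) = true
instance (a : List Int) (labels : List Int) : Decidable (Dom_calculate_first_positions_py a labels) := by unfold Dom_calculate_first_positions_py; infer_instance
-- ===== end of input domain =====

-- B replaces A's dict-building single pass (with early break) by a simpler per-label a.index scan with try/except; same results, no speed claim.

-- ===== PORT A =====
-- the 'for i, x in enumerate(a)' loop, carrying positions and count; the break is the early return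
def cfpLoop (labels : List Int) (rest : List (Int × Int)) (positions : PySem.Dict Int Int) (count : Int) : PySem.Dict Int Int :=
  match rest with
  | [] => positions
  | (i, x) :: t =>
    if labels.contains x && !(positions.contains x) then
      let positions' := positions.insert x i
      if count + 1 = (labels.length : Int) then positions'
      else cfpLoop labels t positions' (count + 1)
    else cfpLoop labels t positions count

def calculate_first_positions_py (a : List Int) (labels : List Int) : List (Option Int) :=
  if labels.length = 0 then []
  else
    let positions := cfpLoop labels (PySem.List.enumerate a) PySem.Dict.empty 0
    labels.map (fun x => positions.get? x)

-- ===== PORT B =====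
def calculate_first_positions_py_alt (a : List Int) (labels : List Int) : List (Option Int) :=
  labels.foldl (fun result label =>
    match PySem.List.index? a label with   -- try: a.index(label) … except ValueError
    | some i => result ++ [some (i : Int)]
    | none => result ++ [none]) []

-- ===== PRECONDITION & SPEC =====
def Spec_calculate_first_positions_py (a : List Int) (labels : List Int) (out : List (Option Int)) : Prop := out = calculate_first_positions_py_alt a labels
instance (a : List Int) (labels : List Int) (out : List (Option Int)) : Decidable (Spec_calculate_first_positions_py a labels out) := by unfold Spec_calculate_first_positions_py; infer_instance

-- ===== CLAIM (what is proved, stated in full; the proofs are below) =====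
def Claim_equal_calculate_first_positions_py : Prop := ∀ (a : List Int) (labels : List Int), Dom_calculate_first_positions_py a labels → Spec_calculate_first_positions_py a labels (calculate_first_positions_py a labels)

-- ===== LEMMAS AND PROOFS =====

-- when the dict holds as many (distinct, labels-drawn) keys as labels has entries, every label is a key
lemma keys_cover (labels ks : List Int) (hnd : ks.Nodup) (hsub : ∀ k ∈ ks, k ∈ labels)
    (hlen : ks.length = labels.length) : ∀ x ∈ labels, x ∈ ks := by
  intro x hx
  have hsub' : ks ⊆ labels.dedup := fun k hk => List.mem_dedup.mpr (hsub k hk)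
  have hsp := List.subperm_of_subset hnd hsub'
  have hdl : labels.dedup.length ≤ ks.length := by
    have := (List.dedup_sublist labels).length_le
    omega
  exact (hsp.perm_of_length_le hdl).mem_iff.mpr (List.mem_dedup.mpr hx)

-- the cons-shift of a first-index lookup offset by the running enumerate counter
lemma or_index_shift (t : List Int) (x y : Int) (s : Int) (hne : y ≠ x) (o : Option Int) :
    o.or (Option.map (fun j : Nat => (s + 1) + (j : Int)) (PySem.List.index? t x))
      = o.or (Option.map (fun j : Nat => s + (j : Int)) (PySem.List.index? (y :: t) x)) := by
  rw [PySem.List.index?_cons_of_ne t hne, Option.map_map]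
  congr 1
  refine congrFun (congrArg Option.map (funext fun j => ?_)) _
  show (s + 1) + (j : Int) = s + ((j + 1 : Nat) : Int)
  push_cast; ring

-- loop invariant: the final lookup of a label is its recorded position, else the counter plus its first index in the remaining input
lemma cfpLoop_get (labels : List Int) (rest : List Int) : ∀ (s : Int)
    (positions : PySem.Dict Int Int) (count : Int),
    count = (positions.keys.length : Int) →
    (∀ k ∈ positions.keys, k ∈ labels) →
    positions.keys.Nodup →
    ∀ x ∈ labels,
      (cfpLoop labels (PySem.List.enumerate rest s) positions count).get? x
        = (positions.get? x).or (Option.map (fun j : Nat => s + (j : Int)) (PySem.List.index? rest x)) := by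
  induction rest with
  | nil =>
    intro s positions count _ _ _ x _
    simp [PySem.List.enumerate_nil, cfpLoop, PySem.List.index?]
  | cons y t ih =>
    intro s positions count hc hsub hnd x hx
    rw [PySem.List.enumerate_cons]
    by_cases hylab : y ∈ labels
    · by_cases hyc : positions.contains y = true
      · -- y already recorded: condition false, plain recursion
        have hcond : (labels.contains y && !(positions.contains y)) = false := by
          rw [hyc, Bool.not_true, Bool.and_false]
        have hstep : cfpLoop labels ((s, y) :: PySem.List.enumerate t (s + 1)) positions count
            = cfpLoop labels (PySem.List.enumerate t (s + 1)) positions count := by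
          rw [cfpLoop, hcond]; simp
        rw [hstep, ih (s + 1) positions count hc hsub hnd x hx]
        by_cases hxy : x = y
        · subst hxy
          have hsome : (positions.get? x).isSome = true := by
            rw [← PySem.Dict.contains_eq_isSome_get?]; exact hyc
          obtain ⟨v, hv⟩ := Option.isSome_iff_exists.mp hsome
          rw [hv]; simp
        · exact or_index_shift t x y s (fun h => hxy h.symm) _
      · -- y fresh and in labels: the insert fires
        have hyc' : positions.contains y = false := by simpa using hyc
        have hgy : positions.get? y = none := by
          rw [PySem.Dict.get?_eq_none_iff_contains]; exact hyc'
        have h1 : labels.contains y = true := by simpa using hylab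
        have hcond : (labels.contains y && !(positions.contains y)) = true := by
          rw [h1, hyc']; rfl
        have hkeys' : (positions.insert y s).keys = positions.keys ++ [y] :=
          PySem.Dict.keys_insert_of_not_contains positions s hyc'
        have hnd' : (positions.insert y s).keys.Nodup :=
          PySem.Dict.nodup_keys_insert positions y s hnd
        have hsub' : ∀ k ∈ (positions.insert y s).keys, k ∈ labels := by
          intro k hk
          rcases (PySem.Dict.mem_keys_insert positions y k s).mp hk with h | h
          · exact h ▸ hylab
          · exact hsub k h
        by_cases hbrk : count + 1 = (labels.length : Int)
        · -- the break: the dict now covers every label, the rest of a is irrelevant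
          have hstep : cfpLoop labels ((s, y) :: PySem.List.enumerate t (s + 1)) positions count
              = positions.insert y s := by
            rw [cfpLoop, hcond]; simp [hbrk]
          rw [hstep]
          have hlen : (positions.insert y s).keys.length = labels.length := by
            rw [hkeys']; simp; omega
          have hcover := keys_cover labels _ hnd' hsub' hlen
          by_cases hxy : x = y
          · subst hxy
            rw [PySem.Dict.get?_insert_self, hgy, PySem.List.index?_cons_self]
            simp
          · rw [PySem.Dict.get?_insert_of_ne positions s hxy]
            have hxk : x ∈ positions.keys := by
              rcases List.mem_append.mp (hkeys' ▸ hcover x hx) with h | h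
              · exact h
              · simp at h; exact absurd h hxy
            have hcx : positions.contains x = true :=
              (PySem.Dict.contains_iff_mem_keys positions x).mpr hxk
            have hsome : (positions.get? x).isSome = true := by
              rw [← PySem.Dict.contains_eq_isSome_get?]; exact hcx
            obtain ⟨v, hv⟩ := Option.isSome_iff_exists.mp hsome
            rw [hv]; simp
        · -- no break: recurse with the updated dict and count
          have hstep : cfpLoop labels ((s, y) :: PySem.List.enumerate t (s + 1)) positions count
              = cfpLoop labels (PySem.List.enumerate t (s + 1)) (positions.insert y s) (count + 1) := by
            rw [cfpLoop, hcond]; simp [hbrk]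
          have hc' : count + 1 = ((positions.insert y s).keys.length : Int) := by
            rw [hkeys']; simp; omega
          rw [hstep, ih (s + 1) (positions.insert y s) (count + 1) hc' hsub' hnd' x hx]
          by_cases hxy : x = y
          · subst hxy
            rw [PySem.Dict.get?_insert_self, hgy, PySem.List.index?_cons_self]
            simp
          · rw [PySem.Dict.get?_insert_of_ne positions s hxy]
            exact or_index_shift t x y s (fun h => hxy h.symm) _
    · -- y not a label: condition false, plain recursion; also x ≠ y
      have h1 : labels.contains y = false := by simpa using hylab
      have hcond : (labels.contains y && !(positions.contains y)) = false := by
        rw [h1]; rfl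
      have hstep : cfpLoop labels ((s, y) :: PySem.List.enumerate t (s + 1)) positions count
          = cfpLoop labels (PySem.List.enumerate t (s + 1)) positions count := by
        rw [cfpLoop, hcond]; simp
      rw [hstep, ih (s + 1) positions count hc hsub hnd x hx]
      exact or_index_shift t x y s (fun h => hylab (h ▸ hx)) _

-- B's fold body is an append of one mapped element
lemma alt_eq_map (a : List Int) (labels : List Int) :
    calculate_first_positions_py_alt a labels
      = labels.map (fun label => Option.map (fun i : Nat => (i : Int)) (PySem.List.index? a label)) := by
  unfold calculate_first_positions_py_alt
  have hbody : (fun (result : List (Option Int)) label =>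
      match PySem.List.index? a label with
      | some i => result ++ [some (i : Int)]
      | none => result ++ [none])
    = fun result label => result ++ [Option.map (fun i : Nat => (i : Int)) (PySem.List.index? a label)] := by
    funext result label
    cases PySem.List.index? a label <;> rfl
  rw [hbody, PySem.List.foldl_append_singleton_eq_map, List.nil_append]

-- ===== VERDICT (by name: the statement is the Claim_ definition above) =====
theorem calculate_first_positions_py_spec : Claim_equal_calculate_first_positions_py := by
  intro a labels _
  unfold Spec_calculate_first_positions_py
  rw [alt_eq_map]
  unfold calculate_first_positions_py
  by_cases hl : labels.length = 0
  · rw [if_pos hl, List.length_eq_zero_iff.mp hl, List.map_nil]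
  · rw [if_neg hl]
    apply List.map_congr_left
    intro x hx
    rw [cfpLoop_get labels a 0 PySem.Dict.empty 0 (by simp) (by simp) (by simp) x hx]
    simp
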